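-- pv_equiv track=rewrite | github.com/marcepanowyy/AlgorithmsDataStructures | practice/year_2020/colloquium_retake/term_1/zad2.py | number_components
-- ===== SOURCE A (Python) =====
-- def number_components(G, is_art):
--     n = len(G)
--     numbers = [-1] * n
--     token = 0
--
--     def dfs(u):
--         numbers[u] = token
--         for v in range(n):
--             if G[u][v] and numbers[v] < 0 and not is_art[v]:
--                 dfs(v)
--
--     for u in range(n):
--         if numbers[u] < 0:
--             if not is_art[u]:
--                 dfs(u)
--             else:
--                 numbers[u] = token
--             token += 1
--
--     return numbers
-- ===== SOURCE B (Python) =====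
-- def number_components(G, is_art):
--     # Level-by-level BFS with frontier lists, marking vertices on push; same return value.
--     n = len(G)
--     numbers = [-1] * n
--     token = 0
--     for u in range(n):
--         if numbers[u] >= 0:
--             continue
--         numbers[u] = token
--         if not is_art[u]:
--             frontier = [u]
--             while frontier:
--                 nxt = []
--                 for w in frontier:
--                     for v in range(n):
--                         if G[w][v] and numbers[v] < 0 and not is_art[v]:
--                             numbers[v] = token
--                             nxt.append(v)
--                 frontier = nxt
--         token += 1
--     return numbers
-- ===== Notes on version B (the rewrite author's own statement) =====
-- stated objective: alternative
-- what changed: The recursive dfs over each component is replaced by a level-by-level BFS with explicit frontier lists that marks vertices on push (building each next frontier in one sweep over the current one), and the outer loop is restructured with an early continue; no recursion remains.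
import Mathlib
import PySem

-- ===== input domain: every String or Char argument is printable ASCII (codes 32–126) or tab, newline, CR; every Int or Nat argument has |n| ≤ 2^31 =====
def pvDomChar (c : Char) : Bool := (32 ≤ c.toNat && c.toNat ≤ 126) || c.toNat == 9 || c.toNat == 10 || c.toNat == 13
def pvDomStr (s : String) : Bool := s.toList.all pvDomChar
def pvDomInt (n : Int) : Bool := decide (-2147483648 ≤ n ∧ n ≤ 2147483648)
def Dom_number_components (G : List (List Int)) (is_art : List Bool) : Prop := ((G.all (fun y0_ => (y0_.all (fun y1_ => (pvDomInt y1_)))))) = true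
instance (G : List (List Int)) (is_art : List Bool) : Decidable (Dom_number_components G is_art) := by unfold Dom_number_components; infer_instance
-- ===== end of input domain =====

-- B replaces A's recursive dfs by a level-by-level BFS over frontier lists that marks
-- vertices on push; the outer numbering loop is restructured (early continue, mark first);
-- the return value is proved identical.

-- ===== PORT A =====
-- recursive dfs of A, with fuel for termination (the proofs show the fuel G.length never runs out)
def nccDfs (G : List (List Int)) (art : List Bool) (t : Int) : Nat → Nat → List Int → List Int
  | 0, _, nums => nums
  | fuel+1, u, nums =>
      (List.range G.length).foldl
        (fun ns v =>
          if (G.getD u []).getD v 0 ≠ 0 ∧ ns.getD v (-1) < 0 ∧ art.getD v false = false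
          then nccDfs G art t fuel v ns else ns)
        (nums.set u t)

def number_components (G : List (List Int)) (is_art : List Bool) : List Int :=
  ((List.range G.length).foldl
    (fun s u =>
      if s.1.getD u (-1) < 0 then
        if is_art.getD u false = false
        then (nccDfs G is_art s.2 G.length u s.1, s.2 + 1)
        else (s.1.set u s.2, s.2 + 1)
      else s)
    (List.replicate G.length (-1), 0)).1

-- ===== PORT B =====
-- the body of B's innermost 'for v in range(n)': mark v and append it to the next frontier
def nccBfsStep (G : List (List Int)) (art : List Bool) (t : Int) (w : Nat) :
    (List Int × List Nat) → Nat → (List Int × List Nat) :=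
  fun s v =>
    if (G.getD w []).getD v 0 ≠ 0 ∧ s.1.getD v (-1) < 0 ∧ art.getD v false = false
    then (s.1.set v t, s.2 ++ [v]) else s

-- one round of B's while-loop: sweep the current frontier, collecting the next one
def nccBfsRound (G : List (List Int)) (art : List Bool) (t : Int)
    (frontier : List Nat) (nums : List Int) : List Int × List Nat :=
  frontier.foldl (fun s w => (List.range G.length).foldl (nccBfsStep G art t w) s) (nums, [])

-- B's while-loop, with fuel (the proofs show G.length + 1 rounds always suffice)
def nccBfs (G : List (List Int)) (art : List Bool) (t : Int) : Nat → List Nat → List Int → List Int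
  | 0, _, nums => nums
  | _+1, [], nums => nums
  | fuel+1, w :: rest, nums =>
      let s := nccBfsRound G art t (w :: rest) nums
      nccBfs G art t fuel s.2 s.1

def number_components_alt (G : List (List Int)) (is_art : List Bool) : List Int :=
  ((List.range G.length).foldl
    (fun s u =>
      if 0 ≤ s.1.getD u (-1) then s
      else
        (if is_art.getD u false then s.1.set u s.2
         else nccBfs G is_art s.2 (G.length + 1) [u] (s.1.set u s.2), s.2 + 1))
    (List.replicate G.length (-1), 0)).1

-- ===== PRECONDITION & SPEC =====
-- Pre_ excludes exactly the inputs on which Python A raises IndexError: A evaluates is_art[u]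
-- for every u in range(n) and scans the full row of every non-articulation vertex (rows of
-- articulation vertices are never indexed), so those and only those indexings must be in range.
def Pre_number_components (G : List (List Int)) (is_art : List Bool) : Prop :=
  G.length ≤ is_art.length ∧
  ∀ u < G.length, is_art.getD u false = true ∨ G.length ≤ (G.getD u []).length

instance (G : List (List Int)) (is_art : List Bool) : Decidable (Pre_number_components G is_art) := by
  unfold Pre_number_components; infer_instance

def pvWitness_number_components : List (List Int) × List Bool := ([[0, 1], [1, 0]], [false, false])

def Spec_number_components (G : List (List Int)) (is_art : List Bool) (out : List Int) : Prop := out = number_components_alt G is_art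
instance (G : List (List Int)) (is_art : List Bool) (out : List Int) : Decidable (Spec_number_components G is_art out) := by unfold Spec_number_components; infer_instance

-- ===== CLAIM (what is proved, stated in full; the proofs are below) =====
def Claim_equal_number_components : Prop := ∀ (G : List (List Int)) (is_art : List Bool), Dom_number_components G is_art → Pre_number_components G is_art → Spec_number_components G is_art (number_components G is_art)

-- ===== LEMMAS AND PROOFS =====

-- number of still-unvisited entries (the termination measure of both traversals)
def nccNeg (l : List Int) : Nat := l.countP (fun x => decide (x < 0))

-- the step function of A's inner for-loop (a name for the proofs)
def nccDfsStep (G : List (List Int)) (art : List Bool) (t : Int) (fuel u : Nat)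
    (ns : List Int) (v : Nat) : List Int :=
  if (G.getD u []).getD v 0 ≠ 0 ∧ ns.getD v (-1) < 0 ∧ art.getD v false = false
  then nccDfs G art t fuel v ns else ns

lemma ncc_dfs_unfold (G : List (List Int)) (art : List Bool) (t : Int) (fuel u : Nat) (nums : List Int) :
    nccDfs G art t (fuel+1) u nums
      = (List.range G.length).foldl (nccDfsStep G art t fuel u) (nums.set u t) := rfl

-- getD / set basics
lemma ncc_getD_set_self (l : List Int) (u : Nat) (t : Int) (h : u < l.length) :
    (l.set u t).getD u (-1) = t := by
  simp [List.getD, List.getElem?_set, h]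

lemma ncc_getD_set_ne (l : List Int) (u v : Nat) (t : Int) (h : v ≠ u) :
    (l.set u t).getD v (-1) = l.getD v (-1) := by
  simp [List.getD, List.getElem?_set, (Ne.symm h : u ≠ v)]

lemma ncc_getD_ext : ∀ (a b : List Int), a.length = b.length →
    (∀ v, a.getD v (-1) = b.getD v (-1)) → a = b := by
  intro a
  induction a with
  | nil => intro b h _; cases b with
    | nil => rfl
    | cons y ys => simp at h
  | cons x xs ih =>
    intro b h hp
    cases b with
    | nil => simp at h
    | cons y ys =>
      have h0 := hp 0
      simp only [List.getD_cons_zero] at h0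
      have := ih ys (by simpa using h) (fun v => by simpa using hp (v+1))
      rw [h0, this]

-- nccNeg facts
lemma nccNeg_le_length (l : List Int) : nccNeg l ≤ l.length := List.countP_le_length ..

lemma nccNeg_pos : ∀ (l : List Int) (u : Nat), u < l.length → l.getD u (-1) < 0 → 0 < nccNeg l := by
  intro l
  induction l with
  | nil => intro u h; simp at h
  | cons x xs ih =>
    intro u hu hneg
    cases u with
    | zero =>
      simp only [List.getD_cons_zero] at hneg
      simp [nccNeg, List.countP_cons, hneg]
    | succ u =>
      have := ih u (by simpa using hu) (by simpa using hneg)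
      simp only [nccNeg, List.countP_cons] at *
      omega

lemma nccNeg_set_lt : ∀ (l : List Int) (u : Nat) (t : Int), u < l.length →
    l.getD u (-1) < 0 → 0 ≤ t → nccNeg (l.set u t) < nccNeg l := by
  intro l
  induction l with
  | nil => intro u t h; simp at h
  | cons x xs ih =>
    intro u t hu hneg ht
    cases u with
    | zero =>
      simp only [List.getD_cons_zero] at hneg
      simp only [List.set, nccNeg, List.countP_cons]
      have h1 : (decide (t < 0)) = false := by simp; omega
      have h2 : (decide (x < 0)) = true := by simpa using hneg
      simp [h1, h2]
    | succ u =>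
      have := ih u t (by simpa using hu) (by simpa using hneg) ht
      simp only [List.set, nccNeg, List.countP_cons]
      unfold nccNeg at this
      omega

-- the "extends" relation: marking only turns unvisited non-articulation entries into t
def nccExt (t : Int) (art : List Bool) (a b : List Int) : Prop :=
  a.length = b.length ∧
  ∀ v : Nat, b.getD v (-1) = a.getD v (-1) ∨
    (a.getD v (-1) < 0 ∧ art.getD v false = false ∧ b.getD v (-1) = t)

lemma nccExt_refl (t : Int) (art : List Bool) (a : List Int) : nccExt t art a a :=
  ⟨rfl, fun _ => Or.inl rfl⟩

lemma nccExt_set (t : Int) (art : List Bool) (l : List Int) (u : Nat)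
    (hu : u < l.length) (hneg : l.getD u (-1) < 0) (hart : art.getD u false = false) :
    nccExt t art l (l.set u t) := by
  refine ⟨(List.length_set ..).symm, fun v => ?_⟩
  by_cases hv : v = u
  · subst hv; exact Or.inr ⟨hneg, hart, ncc_getD_set_self l v t hu⟩
  · exact Or.inl (ncc_getD_set_ne l u v t hv)

lemma nccExt_trans {t : Int} {art : List Bool} {a b c : List Int} (ht : 0 ≤ t)
    (h1 : nccExt t art a b) (h2 : nccExt t art b c) : nccExt t art a c := by
  refine ⟨h1.1.trans h2.1, fun v => ?_⟩
  rcases h2.2 v with hc | ⟨hbneg, hartv, hct⟩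
  · rcases h1.2 v with hb | ⟨haneg, hartv, hbt⟩
    · exact Or.inl (hc.trans hb)
    · exact Or.inr ⟨haneg, hartv, hc.trans hbt⟩
  · rcases h1.2 v with hb | ⟨haneg, hartv', hbt⟩
    · exact Or.inr ⟨hb ▸ hbneg, hartv, hct⟩
    · exact absurd hbneg (by rw [hbt]; omega)

lemma nccExt_neg {t : Int} {art : List Bool} {a b : List Int} (ht : 0 ≤ t)
    (h : nccExt t art a b) (v : Nat) (hv : b.getD v (-1) < 0) :
    a.getD v (-1) = b.getD v (-1) := by
  rcases h.2 v with hc | ⟨_, _, hbt⟩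
  · exact hc.symm
  · rw [hbt] at hv; omega

lemma nccExt_nonneg {t : Int} {art : List Bool} {a b : List Int} (ht : 0 ≤ t)
    (h : nccExt t art a b) (v : Nat) (hv : 0 ≤ a.getD v (-1)) : 0 ≤ b.getD v (-1) := by
  rcases h.2 v with hc | ⟨hneg, _, hbt⟩
  · rw [hc]; exact hv
  · omega

lemma nccNeg_mono_aux (t : Int) (ht : 0 ≤ t) : ∀ (a b : List Int), a.length = b.length →
    (∀ v : Nat, b.getD v (-1) = a.getD v (-1) ∨ (a.getD v (-1) < 0 ∧ b.getD v (-1) = t)) →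
    nccNeg b ≤ nccNeg a := by
  intro a
  induction a with
  | nil =>
    intro b h _
    have : b = [] := by cases b with
      | nil => rfl
      | cons y ys => simp at h
    subst this; exact le_refl _
  | cons x xs ih =>
    intro b h hp
    cases b with
    | nil => simp at h
    | cons y ys =>
      have hTail : nccNeg ys ≤ nccNeg xs :=
        ih ys (by simpa using h) (fun v => by simpa using hp (v+1))
      have h0 := hp 0
      simp only [List.getD_cons_zero] at h0
      rcases h0 with he | ⟨hxneg, hyt⟩
      · subst he
        simp only [nccNeg, List.countP_cons] at *
        omega
      · subst hyt
        have h1 : (decide (y < 0)) = false := by simp; omega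
        have h2 : (decide (x < 0)) = true := by simpa using hxneg
        simp [nccNeg, List.countP_cons, h1, h2] at *
        omega

lemma nccNeg_mono {t : Int} {art : List Bool} (ht : 0 ≤ t) :
    ∀ (a b : List Int), nccExt t art a b → nccNeg b ≤ nccNeg a := by
  intro a b h
  exact nccNeg_mono_aux t ht a b h.1
    (fun v => (h.2 v).elim Or.inl (fun ⟨h1, _, h3⟩ => Or.inr ⟨h1, h3⟩))

-- strict decrease when at least one entry really got marked
lemma nccNeg_strict {t : Int} {art : List Bool} (ht : 0 ≤ t) (a b : List Int)
    (hext : nccExt t art a b) (v0 : Nat) (hv0 : v0 < a.length)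
    (hneg : a.getD v0 (-1) < 0) (hbt : b.getD v0 (-1) = t) :
    nccNeg b < nccNeg a := by
  have h1 : nccNeg b ≤ nccNeg (a.set v0 t) := by
    apply nccNeg_mono_aux t ht
    · rw [List.length_set]; exact hext.1
    · intro v
      by_cases hv : v = v0
      · subst hv
        exact Or.inl (by rw [hbt, ncc_getD_set_self a v t hv0])
      · rw [ncc_getD_set_ne a v0 v t hv]
        rcases hext.2 v with he | ⟨hn, _, hbt'⟩
        · exact Or.inl he
        · exact Or.inr ⟨hn, hbt'⟩
  have h2 := nccNeg_set_lt a v0 t hv0 hneg ht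
  omega

-- reachability through unvisited non-articulation vertices (w.r.t. a fixed state nums)
inductive nccReach (G : List (List Int)) (art : List Bool) (nums : List Int) (u : Nat) : Nat → Prop
  | refl : nccReach G art nums u u
  | step {w v : Nat} : nccReach G art nums u w → v < G.length →
      (G.getD w []).getD v 0 ≠ 0 → nums.getD v (-1) < 0 → art.getD v false = false →
      nccReach G art nums u v

lemma nccReach_mono {G : List (List Int)} {art : List Bool} {t : Int} {nums nums' : List Int}
    {u x : Nat} (ht : 0 ≤ t) (hext : nccExt t art nums nums') :
    nccReach G art nums' u x → nccReach G art nums u x := by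
  intro h
  induction h with
  | refl => exact .refl
  | step hr hv he hn ha ih =>
    exact .step ih hv he (by rw [nccExt_neg ht hext _ hn]; exact hn) ha

lemma nccReach_trans {G : List (List Int)} {art : List Bool} {nums : List Int} {u w x : Nat}
    (h1 : nccReach G art nums u w) (h2 : nccReach G art nums w x) : nccReach G art nums u x := by
  induction h2 with
  | refl => exact h1
  | step hr hv he hn ha ih => exact .step ih hv he hn ha

-- the characterisation A's dfs satisfies
def nccOut (G : List (List Int)) (art : List Bool) (t : Int) (nums R : List Int) (u : Nat) : Prop :=
  nccExt t art nums R ∧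
  (∀ v, R.getD v (-1) ≠ nums.getD v (-1) → nccReach G art nums u v) ∧
  (∀ w, (w = u ∨ R.getD w (-1) ≠ nums.getD w (-1)) → ∀ v, v < G.length →
      (G.getD w []).getD v 0 ≠ 0 → art.getD v false = false → 0 ≤ R.getD v (-1)) ∧
  R.getD u (-1) = t

-- the characterisation B's BFS satisfies
def nccBfsOut (G : List (List Int)) (art : List Bool) (t : Int) (nums R : List Int) (S : List Nat) : Prop :=
  nccExt t art nums R ∧
  (∀ v, R.getD v (-1) ≠ nums.getD v (-1) → ∃ w ∈ S, nccReach G art nums w v) ∧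
  (∀ w, (w ∈ S ∨ R.getD w (-1) ≠ nums.getD w (-1)) → ∀ v, v < G.length →
      (G.getD w []).getD v 0 ≠ 0 → art.getD v false = false → 0 ≤ R.getD v (-1))

-- A side: the inner for-loop of dfs
lemma ncc_dfs_fold (G : List (List Int)) (art : List Bool) (t : Int) (fuel u : Nat)
    (ht : 0 ≤ t)
    (IH : ∀ (nums : List Int) (x : Nat), nums.length = G.length → x < G.length →
        nums.getD x (-1) < 0 → art.getD x false = false → nccNeg nums ≤ fuel →
        nccOut G art t nums (nccDfs G art t fuel x nums) x) :
    ∀ (L : List Nat) (nums0 : List Int), (∀ v ∈ L, v < G.length) →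
      nums0.length = G.length → nccNeg nums0 ≤ fuel →
      nccExt t art nums0 (L.foldl (nccDfsStep G art t fuel u) nums0) ∧
      (∀ v, (L.foldl (nccDfsStep G art t fuel u) nums0).getD v (-1) ≠ nums0.getD v (-1) →
        ∃ w, w < G.length ∧ (G.getD u []).getD w 0 ≠ 0 ∧ nums0.getD w (-1) < 0 ∧
          art.getD w false = false ∧ nccReach G art nums0 w v) ∧
      (∀ w, (L.foldl (nccDfsStep G art t fuel u) nums0).getD w (-1) ≠ nums0.getD w (-1) →
        ∀ v, v < G.length → (G.getD w []).getD v 0 ≠ 0 → art.getD v false = false →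
          0 ≤ (L.foldl (nccDfsStep G art t fuel u) nums0).getD v (-1)) ∧
      (∀ v ∈ L, (G.getD u []).getD v 0 ≠ 0 → art.getD v false = false →
          0 ≤ (L.foldl (nccDfsStep G art t fuel u) nums0).getD v (-1)) := by
  intro L
  induction L with
  | nil =>
    intro nums0 _ hlen hfuel
    refine ⟨nccExt_refl t art nums0, ?_, ?_, ?_⟩
    · intro v hv; exact absurd rfl hv
    · intro w hw; exact absurd rfl hw
    · intro v hv; simp at hv
  | cons a L ihL =>
    intro nums0 hL hlen hfuel
    have ha : a < G.length := hL a (by simp)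
    rw [List.foldl_cons]
    by_cases hc : (G.getD u []).getD a 0 ≠ 0 ∧ nums0.getD a (-1) < 0 ∧ art.getD a false = false
    · -- the step recurses into dfs a
      have hstep : nccDfsStep G art t fuel u nums0 a = nccDfs G art t fuel a nums0 := by
        unfold nccDfsStep; rw [if_pos hc]
      have houta : nccOut G art t nums0 (nccDfs G art t fuel a nums0) a :=
        IH nums0 a hlen ha hc.2.1 hc.2.2 hfuel
      rw [hstep]
      have hext1 : nccExt t art nums0 (nccDfs G art t fuel a nums0) := houta.1
      have hnext := ihL (nccDfs G art t fuel a nums0) (fun v hv => hL v (by simp [hv]))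
        (hext1.1 ▸ hlen) (le_trans (nccNeg_mono ht _ _ hext1) hfuel)
      set nums1 := nccDfs G art t fuel a nums0 with hn1
      set F := L.foldl (nccDfsStep G art t fuel u) nums1 with hF
      refine ⟨nccExt_trans ht hext1 hnext.1, ?_, ?_, ?_⟩
      · -- soundness
        intro v hv
        by_cases h1 : nums1.getD v (-1) = nums0.getD v (-1)
        · have hv1 : F.getD v (-1) ≠ nums1.getD v (-1) := by rw [h1]; exact hv
          obtain ⟨w, hwlt, hedge, hwneg, hwart, hreach⟩ := hnext.2.1 v hv1
          have hweq : nums0.getD w (-1) = nums1.getD w (-1) := nccExt_neg ht hext1 w hwneg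
          exact ⟨w, hwlt, hedge, by rw [hweq]; exact hwneg, hwart,
            nccReach_mono ht hext1 hreach⟩
        · exact ⟨a, ha, hc.1, hc.2.1, hc.2.2, houta.2.1 v h1⟩
      · -- closure for changed vertices
        intro w hw
        by_cases h1 : nums1.getD w (-1) = nums0.getD w (-1)
        · exact hnext.2.2.1 w (by rw [h1]; exact hw)
        · intro v hvlt hedge hvart
          have := houta.2.2.1 w (Or.inr h1) v hvlt hedge hvart
          exact nccExt_nonneg ht hnext.1 v this
      · -- local closure for processed neighbours
        intro v hv hedge hvart
        rcases List.mem_cons.mp hv with rfl | hvL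
        · have h1 : 0 ≤ nums1.getD v (-1) := by rw [houta.2.2.2]; exact ht
          exact nccExt_nonneg ht hnext.1 v h1
        · exact hnext.2.2.2 v hvL hedge hvart
    · -- the step does nothing
      have hstep : nccDfsStep G art t fuel u nums0 a = nums0 := by
        unfold nccDfsStep; rw [if_neg hc]
      rw [hstep]
      have hnext := ihL nums0 (fun v hv => hL v (by simp [hv])) hlen hfuel
      refine ⟨hnext.1, hnext.2.1, hnext.2.2.1, ?_⟩
      intro v hv hedge hvart
      rcases List.mem_cons.mp hv with rfl | hvL
      · have h0 : ¬ nums0.getD v (-1) < 0 := fun hneg => hc ⟨hedge, hneg, hvart⟩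
        exact nccExt_nonneg ht hnext.1 v (by omega)
      · exact hnext.2.2.2 v hvL hedge hvart

lemma ncc_dfs_out (G : List (List Int)) (art : List Bool) (t : Int) (ht : 0 ≤ t) :
    ∀ (fuel : Nat) (nums : List Int) (u : Nat),
      nums.length = G.length → u < G.length → nums.getD u (-1) < 0 →
      art.getD u false = false → nccNeg nums ≤ fuel →
      nccOut G art t nums (nccDfs G art t fuel u nums) u := by
  intro fuel
  induction fuel with
  | zero =>
    intro nums u hlen hu hneg hart hfuel
    have := nccNeg_pos nums u (hlen ▸ hu) hneg
    omega
  | succ f ihf =>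
    intro nums u hlen hu hneg hart hfuel
    rw [ncc_dfs_unfold]
    have hu' : u < nums.length := hlen ▸ hu
    have hset : nccNeg (nums.set u t) < nccNeg nums := nccNeg_set_lt nums u t hu' hneg ht
    have hfold := ncc_dfs_fold G art t f u ht ihf (List.range G.length) (nums.set u t)
      (fun v hv => List.mem_range.mp hv) (by simp [hlen]) (by omega)
    have hext0 : nccExt t art nums (nums.set u t) := nccExt_set t art nums u hu' hneg hart
    set F := (List.range G.length).foldl (nccDfsStep G art t f u) (nums.set u t) with hFdef
    have hset_u : (nums.set u t).getD u (-1) = t := ncc_getD_set_self nums u t hu'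
    have hFu : F.getD u (-1) = t := by
      rcases hfold.1.2 u with he | ⟨hneg', _, het⟩
      · rw [he, hset_u]
      · exact het
    refine ⟨nccExt_trans ht hext0 hfold.1, ?_, ?_, hFu⟩
    · -- soundness
      intro v hv
      by_cases hvu : v = u
      · subst hvu; exact .refl
      · have h1 : (nums.set u t).getD v (-1) = nums.getD v (-1) := ncc_getD_set_ne nums u v t hvu
        obtain ⟨w, hwlt, hedge, hwneg, hwart, hreach⟩ := hfold.2.1 v (by rw [h1]; exact hv)
        have hwu : w ≠ u := by
          intro h; rw [h, hset_u] at hwneg; omega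
        have hw0 : nums.getD w (-1) < 0 := by
          rw [← ncc_getD_set_ne nums u w t hwu]; exact hwneg
        exact nccReach_trans (.step .refl hwlt hedge hw0 hwart)
          (nccReach_mono ht hext0 hreach)
    · -- closure
      intro w hw v hvlt hedge hvart
      by_cases hwu : w = u
      · subst hwu
        exact hfold.2.2.2 v (List.mem_range.mpr hvlt) hedge hvart
      · rcases hw with rfl | hne
        · exact absurd rfl hwu
        · have h1 : (nums.set u t).getD w (-1) = nums.getD w (-1) := ncc_getD_set_ne nums u w t hwu
          exact hfold.2.2.1 w (by rw [h1]; exact hne) v hvlt hedge hvart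

-- B side: the innermost sweep 'for v in range(n)' for a fixed frontier vertex w
lemma ncc_bfs_inner (G : List (List Int)) (art : List Bool) (t : Int) (w : Nat) (ht : 0 ≤ t) :
    ∀ (L : List Nat) (N : List Int) (X : List Nat), (∀ v ∈ L, v < G.length) →
      N.length = G.length →
      nccExt t art N (L.foldl (nccBfsStep G art t w) (N, X)).1 ∧
      (∀ v, (L.foldl (nccBfsStep G art t w) (N, X)).1.getD v (-1) ≠ N.getD v (-1) →
        v < G.length ∧ N.getD v (-1) < 0 ∧ art.getD v false = false ∧
        (G.getD w []).getD v 0 ≠ 0 ∧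
        (L.foldl (nccBfsStep G art t w) (N, X)).1.getD v (-1) = t ∧
        v ∈ (L.foldl (nccBfsStep G art t w) (N, X)).2) ∧
      (∀ v ∈ X, v ∈ (L.foldl (nccBfsStep G art t w) (N, X)).2) ∧
      (∀ v ∈ (L.foldl (nccBfsStep G art t w) (N, X)).2, v ∈ X ∨
        (L.foldl (nccBfsStep G art t w) (N, X)).1.getD v (-1) ≠ N.getD v (-1)) ∧
      (∀ v ∈ L, (G.getD w []).getD v 0 ≠ 0 → art.getD v false = false →
        0 ≤ (L.foldl (nccBfsStep G art t w) (N, X)).1.getD v (-1)) := by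
  intro L
  induction L with
  | nil =>
    intro N X _ _
    refine ⟨nccExt_refl t art N, ?_, fun v hv => hv, fun v hv => Or.inl hv, ?_⟩
    · intro v hv; exact absurd rfl hv
    · intro v hv; simp at hv
  | cons a L ihL =>
    intro N X hL hNlen
    have ha : a < G.length := hL a (by simp)
    have ha' : a < N.length := hNlen ▸ ha
    rw [List.foldl_cons]
    by_cases hc : (G.getD w []).getD a 0 ≠ 0 ∧ N.getD a (-1) < 0 ∧ art.getD a false = false
    · -- a is marked and pushed
      have hstep : nccBfsStep G art t w (N, X) a = (N.set a t, X ++ [a]) := by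
        unfold nccBfsStep; rw [if_pos hc]
      rw [hstep]
      have hsetlen : (N.set a t).length = G.length := by simp [hNlen]
      have hnext := ihL (N.set a t) (X ++ [a]) (fun v hv => hL v (by simp [hv])) hsetlen
      have hext0 : nccExt t art N (N.set a t) := nccExt_set t art N a ha' hc.2.1 hc.2.2
      set F := L.foldl (nccBfsStep G art t w) (N.set a t, X ++ [a]) with hF
      have hseta : (N.set a t).getD a (-1) = t := ncc_getD_set_self N a t ha'
      have hFa : F.1.getD a (-1) = t := by
        rcases hnext.1.2 a with he | ⟨_, _, het⟩
        · rw [he, hseta]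
        · exact het
      have haF2 : a ∈ F.2 := hnext.2.2.1 a (by simp)
      refine ⟨nccExt_trans ht hext0 hnext.1, ?_, ?_, ?_, ?_⟩
      · intro v hv
        by_cases hva : v = a
        · subst hva
          exact ⟨ha, hc.2.1, hc.2.2, hc.1, hFa, haF2⟩
        · have h1 : (N.set a t).getD v (-1) = N.getD v (-1) := ncc_getD_set_ne N a v t hva
          obtain ⟨hvlt, hvneg, hvart, hedge, hvt, hvmem⟩ := hnext.2.1 v (by rw [h1]; exact hv)
          exact ⟨hvlt, h1 ▸ hvneg, hvart, hedge, hvt, hvmem⟩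
      · intro v hv
        exact hnext.2.2.1 v (by simp [hv])
      · intro v hv
        rcases hnext.2.2.2.1 v hv with hvx | hvch
        · rcases List.mem_append.mp hvx with hvx | hva
          · exact Or.inl hvx
          · rcases List.mem_singleton.mp hva with rfl
            exact Or.inr (by rw [hFa]; omega)
        · by_cases hva : v = a
          · subst hva; exact Or.inr (by rw [hFa]; omega)
          · exact Or.inr (by rw [ncc_getD_set_ne N a v t hva] at hvch; exact hvch)
      · intro v hv hedge hvart
        rcases List.mem_cons.mp hv with rfl | hvL
        · exact nccExt_nonneg ht hnext.1 v (by rw [hseta]; exact ht)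
        · exact hnext.2.2.2.2 v hvL hedge hvart
    · -- a is skipped
      have hstep : nccBfsStep G art t w (N, X) a = (N, X) := by
        unfold nccBfsStep; rw [if_neg hc]
      rw [hstep]
      have hnext := ihL N X (fun v hv => hL v (by simp [hv])) hNlen
      refine ⟨hnext.1, hnext.2.1, hnext.2.2.1, hnext.2.2.2.1, ?_⟩
      intro v hv hedge hvart
      rcases List.mem_cons.mp hv with rfl | hvL
      · have h0 : ¬ N.getD v (-1) < 0 := fun hneg => hc ⟨hedge, hneg, hvart⟩
        exact nccExt_nonneg ht hnext.1 v (by omega)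
      · exact hnext.2.2.2.2 v hvL hedge hvart

-- B side: the sweep over a whole frontier (the 'for w in frontier' loop)
lemma ncc_round_go (G : List (List Int)) (art : List Bool) (t : Int) (ht : 0 ≤ t)
    (nums : List Int) (S0 : List Nat) :
    ∀ (S : List Nat) (N : List Int) (X : List Nat),
      N.length = G.length →
      nccExt t art nums N →
      (∀ v, N.getD v (-1) ≠ nums.getD v (-1) →
        v < G.length ∧ nums.getD v (-1) < 0 ∧ art.getD v false = false ∧
        (∃ w ∈ S0, (G.getD w []).getD v 0 ≠ 0) ∧ N.getD v (-1) = t ∧ v ∈ X) →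
      (∀ v ∈ X, N.getD v (-1) ≠ nums.getD v (-1)) →
      (∀ w ∈ S, w ∈ S0) →
      nccExt t art N
        (S.foldl (fun s w => (List.range G.length).foldl (nccBfsStep G art t w) s) (N, X)).1 ∧
      (∀ v, (S.foldl (fun s w => (List.range G.length).foldl (nccBfsStep G art t w) s) (N, X)).1.getD v (-1) ≠ nums.getD v (-1) →
        v < G.length ∧ nums.getD v (-1) < 0 ∧ art.getD v false = false ∧
        (∃ w ∈ S0, (G.getD w []).getD v 0 ≠ 0) ∧
        (S.foldl (fun s w => (List.range G.length).foldl (nccBfsStep G art t w) s) (N, X)).1.getD v (-1) = t ∧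
        v ∈ (S.foldl (fun s w => (List.range G.length).foldl (nccBfsStep G art t w) s) (N, X)).2) ∧
      (∀ v ∈ (S.foldl (fun s w => (List.range G.length).foldl (nccBfsStep G art t w) s) (N, X)).2,
        (S.foldl (fun s w => (List.range G.length).foldl (nccBfsStep G art t w) s) (N, X)).1.getD v (-1) ≠ nums.getD v (-1)) ∧
      (∀ w ∈ S, ∀ v, v < G.length → (G.getD w []).getD v 0 ≠ 0 → art.getD v false = false →
        0 ≤ (S.foldl (fun s w => (List.range G.length).foldl (nccBfsStep G art t w) s) (N, X)).1.getD v (-1)) := by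
  intro S
  induction S with
  | nil =>
    intro N X hNlen hextN hchg hXchg hsub
    refine ⟨nccExt_refl t art N, ?_, hXchg, ?_⟩
    · intro v hv
      obtain ⟨h1, h2, h3, h4, h5, h6⟩ := hchg v hv
      exact ⟨h1, h2, h3, h4, h5, h6⟩
    · intro w hw; simp at hw
  | cons w S ihS =>
    intro N X hNlen hextN hchg hXchg hsub
    rw [List.foldl_cons]
    have hinner := ncc_bfs_inner G art t w ht (List.range G.length) N X
      (fun v hv => List.mem_range.mp hv) hNlen
    set P := (List.range G.length).foldl (nccBfsStep G art t w) (N, X) with hP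
    have hPlen : P.1.length = G.length := hinner.1.1 ▸ hNlen
    have hextNP : nccExt t art N P.1 := hinner.1
    have hextnumsP : nccExt t art nums P.1 := nccExt_trans ht hextN hextNP
    -- re-establish the invariants for (P.1, P.2)
    have hchg' : ∀ v, P.1.getD v (-1) ≠ nums.getD v (-1) →
        v < G.length ∧ nums.getD v (-1) < 0 ∧ art.getD v false = false ∧
        (∃ w' ∈ (w :: S0), (G.getD w' []).getD v 0 ≠ 0) ∧ P.1.getD v (-1) = t ∧ v ∈ P.2 := by
      intro v hv
      by_cases h1 : P.1.getD v (-1) = N.getD v (-1)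
      · obtain ⟨ha, hb, hc, ⟨w', hw', he'⟩, hd, hx⟩ := hchg v (by rw [← h1]; exact hv)
        exact ⟨ha, hb, hc, ⟨w', by simp [hw'], he'⟩, h1 ▸ hd, hinner.2.2.1 v hx⟩
      · obtain ⟨ha, hb, hc, hd, he, hx⟩ := hinner.2.1 v h1
        have hbnums : nums.getD v (-1) < 0 := by
          rcases hextN.2 v with heq | ⟨hn, _, hnt⟩
          · rw [← heq]; exact hb
          · rw [hnt] at hb; omega
        exact ⟨ha, hbnums, hc, ⟨w, by simp, hd⟩, he, hx⟩
    have hXchg' : ∀ v ∈ P.2, P.1.getD v (-1) ≠ nums.getD v (-1) := by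
      intro v hv
      rcases hinner.2.2.2.1 v hv with hvx | hvch
      · have hold := hXchg v hvx
        obtain ⟨_, hb, _, _, hNt, _⟩ := hchg v hold
        rcases hextNP.2 v with heq | ⟨_, _, hPt⟩
        · rw [heq, hNt]; omega
        · rw [hPt]; omega
      · obtain ⟨_, hNneg, _, _, hPt, _⟩ := hinner.2.1 v hvch
        have hbnums : nums.getD v (-1) < 0 := by
          rcases hextN.2 v with heq | ⟨hn, _, hnt⟩
          · rw [← heq]; exact hNneg
          · rw [hnt] at hNneg; omega
        rw [hPt]; omega
    have hrest := ihS P.1 P.2 hPlen hextnumsP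
      (fun v hv => by
        obtain ⟨ha, hb, hc, ⟨w', hw', he'⟩, hd, hx⟩ := hchg' v hv
        rcases List.mem_cons.mp hw' with rfl | hw'S0
        · -- edge source is w itself; need it in S0
          exact ⟨ha, hb, hc, ⟨w', hsub w' (by simp), he'⟩, hd, hx⟩
        · exact ⟨ha, hb, hc, ⟨w', hw'S0, he'⟩, hd, hx⟩)
      hXchg' (fun x hx => hsub x (by simp [hx]))
    refine ⟨nccExt_trans ht hextNP hrest.1, hrest.2.1, hrest.2.2.1, ?_⟩
    intro w' hw' v hvlt hedge hvart
    rcases List.mem_cons.mp hw' with rfl | hw'S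
    · have h0 : 0 ≤ P.1.getD v (-1) :=
        hinner.2.2.2.2 v (List.mem_range.mpr hvlt) hedge hvart
      exact nccExt_nonneg ht hrest.1 v h0
    · exact hrest.2.2.2 w' hw'S v hvlt hedge hvart

lemma ncc_bfs_nil (G : List (List Int)) (art : List Bool) (t : Int) :
    ∀ (fuel : Nat) (nums : List Int), nccBfs G art t fuel [] nums = nums := by
  intro fuel nums; cases fuel <;> rfl

lemma ncc_bfs_cons (G : List (List Int)) (art : List Bool) (t : Int) (f w : Nat)
    (rest : List Nat) (nums : List Int) :
    nccBfs G art t (f+1) (w :: rest) nums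
      = nccBfs G art t f (nccBfsRound G art t (w :: rest) nums).2
          (nccBfsRound G art t (w :: rest) nums).1 := rfl

-- B side: the while-loop satisfies the BFS characterisation
lemma ncc_bfs_out (G : List (List Int)) (art : List Bool) (t : Int) (ht : 0 ≤ t) :
    ∀ (fuel : Nat) (S : List Nat) (nums : List Int),
      nums.length = G.length → nccNeg nums + 1 ≤ fuel →
      nccBfsOut G art t nums (nccBfs G art t fuel S nums) S := by
  intro fuel
  induction fuel with
  | zero =>
    intro S nums _ hfuel; omega
  | succ f ihf =>
    intro S nums hlen hfuel
    cases S with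
    | nil =>
      rw [ncc_bfs_nil]
      refine ⟨nccExt_refl t art nums, fun v hv => absurd rfl hv, fun w hw => ?_⟩
      rcases hw with h | h
      · simp at h
      · exact absurd rfl h
    | cons w rest =>
      rw [ncc_bfs_cons]
      have hround := ncc_round_go G art t ht nums (w :: rest) (w :: rest) nums []
        hlen (nccExt_refl t art nums)
        (fun v hv => absurd rfl hv) (fun v hv => by simp at hv)
        (fun x hx => hx)
      set P := (w :: rest).foldl
        (fun s w' => (List.range G.length).foldl (nccBfsStep G art t w') s) (nums, []) with hPd
      have hPeq : nccBfsRound G art t (w :: rest) nums = P := rfl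
      rw [hPeq]
      have hextP : nccExt t art nums P.1 := hround.1
      have hPlen : P.1.length = G.length := hextP.1 ▸ hlen
      cases hX : P.2 with
      | nil =>
        -- nothing got marked: the round was the identity on nums
        have hid : P.1 = nums := by
          apply ncc_getD_ext P.1 nums (hextP.1.symm)
          intro v
          by_contra hne
          have := (hround.2.1 v hne).2.2.2.2.2
          rw [hX] at this; simp at this
        rw [hid, ncc_bfs_nil]
        refine ⟨nccExt_refl t art nums, fun v hv => absurd rfl hv, ?_⟩
        intro w' hw' v hvlt hedge hvart
        rcases hw' with hmem | hch
        · have := hround.2.2.2 w' hmem v hvlt hedge hvart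
          rw [hid] at this; exact this
        · exact absurd rfl hch
      | cons x xs =>
        -- at least one vertex got marked: nccNeg strictly decreased
        have hxch : P.1.getD x (-1) ≠ nums.getD x (-1) := by
          apply hround.2.2.1; rw [hX]; simp
        obtain ⟨hxlt, hxneg, hxart, hxedge, hxt, _⟩ := hround.2.1 x hxch
        have hdec : nccNeg P.1 < nccNeg nums :=
          nccNeg_strict ht nums P.1 hextP x (hlen ▸ hxlt) hxneg hxt
        have hrec := ihf (x :: xs) P.1 hPlen (by omega)
        refine ⟨nccExt_trans ht hextP hrec.1, ?_, ?_⟩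
        · -- soundness
          intro v hv
          by_cases h1 : P.1.getD v (-1) = nums.getD v (-1)
          · obtain ⟨y, hymem, hreach⟩ := hrec.2.1 v (by rw [h1]; exact hv)
            have hych : P.1.getD y (-1) ≠ nums.getD y (-1) :=
              hround.2.2.1 y (by rw [hX]; exact hymem)
            obtain ⟨hylt, hyneg, hyart, ⟨w', hw'S, he'⟩, _, _⟩ := hround.2.1 y hych
            exact ⟨w', hw'S, nccReach_trans (.step .refl hylt he' hyneg hyart)
              (nccReach_mono ht hextP hreach)⟩
          · obtain ⟨hvlt, hvneg, hvart, ⟨w', hw'S, he'⟩, _, _⟩ := hround.2.1 v h1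
            exact ⟨w', hw'S, .step .refl hvlt he' hvneg hvart⟩
        · -- closure
          intro w' hw' v hvlt hedge hvart
          rcases hw' with hmem | hch
          · have h0 := hround.2.2.2 w' hmem v hvlt hedge hvart
            exact nccExt_nonneg ht hrec.1 v h0
          · by_cases h1 : P.1.getD w' (-1) = nums.getD w' (-1)
            · exact hrec.2.2 w' (Or.inr (by rw [h1]; exact hch)) v hvlt hedge hvart
            · obtain ⟨_, _, _, _, _, hw'X⟩ := hround.2.1 w' h1
              rw [hX] at hw'X
              exact hrec.2.2 w' (Or.inl hw'X) v hvlt hedge hvart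

-- from the BFS characterisation to the pointwise value
lemma ncc_bfs_char (G : List (List Int)) (art : List Bool) (t : Int) (nums : List Int) (u : Nat)
    (ht : 0 ≤ t) (hlen : nums.length = G.length) (hu : u < G.length)
    (hneg : nums.getD u (-1) < 0) (hart : art.getD u false = false) :
    ∀ v, (nccReach G art nums u v →
        (nccBfs G art t (G.length + 1) [u] (nums.set u t)).getD v (-1) = t) ∧
      (¬ nccReach G art nums u v →
        (nccBfs G art t (G.length + 1) [u] (nums.set u t)).getD v (-1) = nums.getD v (-1)) := by
  have hu' : u < nums.length := hlen ▸ hu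
  have hext0 : nccExt t art nums (nums.set u t) := nccExt_set t art nums u hu' hneg hart
  have hset_u : (nums.set u t).getD u (-1) = t := ncc_getD_set_self nums u t hu'
  have hB := ncc_bfs_out G art t ht (G.length + 1) [u] (nums.set u t)
    (by simp [hlen])
    (by have := nccNeg_le_length (nums.set u t); simp [hlen] at this; omega)
  set R := nccBfs G art t (G.length + 1) [u] (nums.set u t) with hR
  have hRu : R.getD u (-1) = t := by
    rcases hB.1.2 u with he | ⟨_, _, het⟩
    · rw [he, hset_u]
    · exact het
  have key : ∀ v, nccReach G art nums u v → R.getD v (-1) = t ∧ (v = u ∨ nums.getD v (-1) < 0) := by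
    intro v hv
    induction hv with
    | refl => exact ⟨hRu, Or.inl rfl⟩
    | @step w v hr hvlt hedge hvneg hvart ih =>
      rcases ih with ⟨hRw, hwcase⟩
      have harg : w ∈ [u] ∨ R.getD w (-1) ≠ (nums.set u t).getD w (-1) := by
        rcases hwcase with he | hn
        · exact Or.inl (by simp [he])
        · by_cases hwu : w = u
          · exact Or.inl (by simp [hwu])
          · rw [ncc_getD_set_ne nums u w t hwu, hRw]
            exact Or.inr (by omega)
      have hcl : 0 ≤ R.getD v (-1) := hB.2.2 w harg v hvlt hedge hvart
      by_cases hvu : v = u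
      · subst hvu; exact ⟨hRu, Or.inl rfl⟩
      · have h1 : (nums.set u t).getD v (-1) = nums.getD v (-1) := ncc_getD_set_ne nums u v t hvu
        rcases hB.1.2 v with he | ⟨_, _, het⟩
        · rw [he, h1] at hcl; omega
        · exact ⟨het, Or.inr hvneg⟩
  intro v
  refine ⟨fun hv => (key v hv).1, fun hv => ?_⟩
  by_contra hne
  by_cases hvu : v = u
  · exact hv (hvu ▸ nccReach.refl)
  · have h1 : (nums.set u t).getD v (-1) = nums.getD v (-1) := ncc_getD_set_ne nums u v t hvu
    obtain ⟨x, hxmem, hreach⟩ := hB.2.1 v (by rw [h1]; exact hne)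
    rcases List.mem_singleton.mp hxmem with rfl
    exact hv (nccReach_mono ht hext0 hreach)

-- from A's characterisation to the pointwise value
lemma ncc_out_char (G : List (List Int)) (art : List Bool) (t : Int) (nums R : List Int) (u : Nat)
    (ht : 0 ≤ t) (hneg : nums.getD u (-1) < 0) (h : nccOut G art t nums R u) :
    ∀ v, (nccReach G art nums u v → R.getD v (-1) = t) ∧
      (¬ nccReach G art nums u v → R.getD v (-1) = nums.getD v (-1)) := by
  have key : ∀ v, nccReach G art nums u v → R.getD v (-1) = t ∧ (v = u ∨ nums.getD v (-1) < 0) := by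
    intro v hv
    induction hv with
    | refl => exact ⟨h.2.2.2, Or.inl rfl⟩
    | @step w v hr hvlt hedge hvneg hvart ih =>
      rcases ih with ⟨hRw, hwcase⟩
      have harg : w = u ∨ R.getD w (-1) ≠ nums.getD w (-1) := by
        rcases hwcase with he | hn
        · exact Or.inl he
        · exact Or.inr (by rw [hRw]; omega)
      have hcl : 0 ≤ R.getD v (-1) := h.2.2.1 w harg v hvlt hedge hvart
      rcases h.1.2 v with he | ⟨_, _, het⟩
      · rw [he] at hcl; omega
      · exact ⟨het, Or.inr hvneg⟩
  intro v
  refine ⟨fun hv => (key v hv).1, fun hv => ?_⟩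
  by_contra hne
  exact hv (h.2.1 v hne)

-- the two component traversals return the same list
lemma ncc_inner_eq (G : List (List Int)) (art : List Bool) (t : Int) (nums : List Int) (u : Nat)
    (ht : 0 ≤ t) (hlen : nums.length = G.length) (hu : u < G.length)
    (hneg : nums.getD u (-1) < 0) (hart : art.getD u false = false) :
    nccDfs G art t G.length u nums = nccBfs G art t (G.length + 1) [u] (nums.set u t) := by
  have hA := ncc_dfs_out G art t ht G.length nums u hlen hu hneg hart
    (hlen ▸ nccNeg_le_length nums)
  have hBlen : (nccBfs G art t (G.length + 1) [u] (nums.set u t)).length = G.length := by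
    have hB := ncc_bfs_out G art t ht (G.length + 1) [u] (nums.set u t)
      (by simp [hlen])
      (by have := nccNeg_le_length (nums.set u t); simp [hlen] at this; omega)
    have := hB.1.1
    simp [hlen] at this
    omega
  apply ncc_getD_ext
  · exact (hA.1.1.symm.trans hlen).trans hBlen.symm
  · intro v
    have hca := ncc_out_char G art t nums _ u ht hneg hA v
    have hcb := ncc_bfs_char G art t nums u ht hlen hu hneg hart v
    by_cases hv : nccReach G art nums u v
    · rw [hca.1 hv, hcb.1 hv]
    · rw [hca.2 hv, hcb.2 hv]

-- length preservation of A's component traversal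
lemma ncc_dfs_len (G : List (List Int)) (art : List Bool) (t : Int) (nums : List Int) (u : Nat)
    (ht : 0 ≤ t) (hlen : nums.length = G.length) (hu : u < G.length)
    (hneg : nums.getD u (-1) < 0) (hart : art.getD u false = false) :
    (nccDfs G art t G.length u nums).length = G.length := by
  have hA := ncc_dfs_out G art t ht G.length nums u hlen hu hneg hart
    (hlen ▸ nccNeg_le_length nums)
  exact hA.1.1.symm.trans hlen

-- the outer numbering loops coincide
lemma ncc_outer_eq (G : List (List Int)) (art : List Bool) :
    ∀ (L : List Nat) (nums : List Int) (tok : Int),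
      (∀ u ∈ L, u < G.length) → nums.length = G.length → 0 ≤ tok →
      L.foldl
        (fun s u =>
          if s.1.getD u (-1) < 0 then
            if art.getD u false = false
            then (nccDfs G art s.2 G.length u s.1, s.2 + 1)
            else (s.1.set u s.2, s.2 + 1)
          else s) (nums, tok)
      = L.foldl
        (fun s u =>
          if 0 ≤ s.1.getD u (-1) then s
          else
            (if art.getD u false then s.1.set u s.2
             else nccBfs G art s.2 (G.length + 1) [u] (s.1.set u s.2), s.2 + 1)) (nums, tok) := by
  intro L
  induction L with
  | nil => intro nums tok _ _ _; rfl
  | cons u L ih =>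
    intro nums tok hL hlen htok
    have hu : u < G.length := hL u (by simp)
    rw [List.foldl_cons, List.foldl_cons]
    by_cases h1 : nums.getD u (-1) < 0
    · have h1' : ¬ 0 ≤ nums.getD u (-1) := by omega
      by_cases h2 : art.getD u false = false
      · have heq := ncc_inner_eq G art tok nums u htok hlen hu h1 h2
        simp only [if_pos h1, if_neg h1', if_pos h2, if_neg (by rw [h2]; simp : ¬ art.getD u false = true)]
        rw [← heq]
        exact ih _ _ (fun v hv => hL v (by simp [hv]))
          (ncc_dfs_len G art tok nums u htok hlen hu h1 h2) (by omega)
      · have h2' : art.getD u false = true := by simp at h2; exact h2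
        simp only [if_pos h1, if_neg h1', if_neg h2, if_pos h2']
        exact ih _ _ (fun v hv => hL v (by simp [hv])) (by simp [hlen]) (by omega)
    · have h1' : 0 ≤ nums.getD u (-1) := by omega
      simp only [if_neg h1, if_pos h1']
      exact ih _ _ (fun v hv => hL v (by simp [hv])) hlen htok

-- ===== VERDICT (by name: the statement is the Claim_ definition above) =====
theorem number_components_spec : Claim_equal_number_components := by
  unfold Claim_equal_number_components
  intro G is_art _ _
  unfold Spec_number_components number_components number_components_alt
  rw [ncc_outer_eq G is_art (List.range G.length) (List.replicate G.length (-1)) 0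
    (fun u hu => List.mem_range.mp hu) (by simp) (by omega)]
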